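-- pv_equiv track=rewrite | github.com/kimseo-0/Algorithm-python | 이것이취업을위한코딩테스트다/part3-기출/3-DFS&BFS/18.py | check_balance_index
-- ===== SOURCE A (Python) =====
-- def check_balance_index(p):
--     left = 0
--     right = 0
--     good = True
--     for i in range(len(p)):
--         if p[i] == "(":
--             left += 1
--         else:
--             right += 1
--         if right > left:
--             good = False
--         if left == right:
--             return i, good
-- ===== SOURCE B (Python) =====
-- def check_balance_index(p):
--     # Phase 1: locate first index where the signed running count returns to 0.
--     cnt = 0
--     idx = None
--     for i, ch in enumerate(p):
--         cnt += 1 if ch == "(" else -1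
--         if cnt == 0:
--             idx = i
--             break
--     if idx is None:
--         return None
--     # Phase 2: validate the prefix p[:idx+1].
--     good = True
--     run = 0
--     for ch in p[:idx + 1]:
--         run += 1 if ch == "(" else -1
--         if run < 0:
--             good = False
--     return idx, good
-- ===== Notes on version B (the rewrite author's own statement) =====
-- stated objective: alternative
-- what changed: Replaces A's single interleaved pass maintaining two counters and a flag with a two-phase structure: a locate pass over one signed running count finding the first balance point, then a separate validate pass over exactly that prefix computing the good flag.
-- outside the precondition, e.g. on check_balance_index('(('): A returns None, B returns None; on check_balance_index(')'): A returns None, B returns None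
import Mathlib
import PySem

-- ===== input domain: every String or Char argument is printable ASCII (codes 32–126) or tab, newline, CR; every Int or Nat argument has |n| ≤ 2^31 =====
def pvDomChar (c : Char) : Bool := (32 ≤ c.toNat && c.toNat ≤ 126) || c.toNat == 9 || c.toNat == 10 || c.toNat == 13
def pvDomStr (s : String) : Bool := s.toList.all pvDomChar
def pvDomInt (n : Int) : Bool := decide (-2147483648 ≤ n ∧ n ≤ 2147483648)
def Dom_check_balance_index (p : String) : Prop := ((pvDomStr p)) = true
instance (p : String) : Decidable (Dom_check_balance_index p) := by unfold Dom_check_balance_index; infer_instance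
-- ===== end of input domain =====

-- B re-decomposes A's interleaved scan into a locate pass (first balance index) and a separate
-- validate pass over exactly that prefix; same O(n) cost, different structure.
-- Pre_ excludes inputs where no prefix balances: there Python A falls off the loop and returns None
-- (no value of the declared tuple type), while B also returns None.

-- ===== PORT A =====
def pvGoA : List Char → Int → Int → Int → Bool → Option (Int × Bool)
  | [], _, _, _, _ => none
  | c :: rest, i, left, right, good =>
    let left' := if c = '(' then left + 1 else left
    let right' := if c = '(' then right else right + 1
    let good' := if right' > left' then false else good
    if left' = right' then some (i, good') else pvGoA rest (i + 1) left' right' good'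

-- Python A returns None when the loop ends without balancing; those inputs are outside Pre_,
-- and the port returns (0, false) there (never exercised under the claim).
def check_balance_index (p : String) : Int × Bool :=
  (pvGoA p.toList 0 0 0 true).getD (0, false)

-- ===== PORT B =====
-- phase 1: first index where the signed running count returns to 0
def pvLocB : List Char → Int → Int → Option Int
  | [], _, _ => none
  | c :: rest, i, cnt =>
    let cnt' := cnt + (if c = '(' then 1 else -1)
    if cnt' = 0 then some i else pvLocB rest (i + 1) cnt'

-- phase 2: validate a prefix (re-scan with a running count, flagging any dip below 0)
def pvValB : List Char → Int → Bool → Bool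
  | [], _, good => good
  | c :: rest, run, good =>
    let run' := run + (if c = '(' then 1 else -1)
    pvValB rest run' (if run' < 0 then false else good)

def check_balance_index_alt (p : String) : Int × Bool :=
  match pvLocB p.toList 0 0 with
  | none => (0, false)           -- Python B returns None here; outside Pre_
  | some i => (i, pvValB (PySem.List.slice p.toList none (some (i + 1))) 0 true)

-- ===== PRECONDITION & SPEC =====
-- Pre_ excludes exactly the inputs on which Python A returns None instead of a tuple:
-- strings with no prefix in which '(' makes up exactly half the characters.
def Pre_check_balance_index (p : String) : Prop :=
  ∃ k < p.toList.length, 2 * ((p.toList.take (k + 1)).count '(') = k + 1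
instance (p : String) : Decidable (Pre_check_balance_index p) := by
  unfold Pre_check_balance_index; infer_instance

def pvWitness_check_balance_index : String := "()"

def Spec_check_balance_index (p : String) (out : Int × Bool) : Prop := out = check_balance_index_alt p
instance (p : String) (out : Int × Bool) : Decidable (Spec_check_balance_index p out) := by unfold Spec_check_balance_index; infer_instance

-- ===== CLAIM (what is proved, stated in full; the proofs are below) =====
def Claim_equal_check_balance_index : Prop := ∀ (p : String), Dom_check_balance_index p → Pre_check_balance_index p → Spec_check_balance_index p (check_balance_index p)

-- ===== LEMMAS AND PROOFS =====
theorem pvLocB_ge : ∀ (l : List Char) (i c j : Int), pvLocB l i c = some j → i ≤ j := by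
  intro l
  induction l with
  | nil => intro i c j h; simp [pvLocB] at h
  | cons a rest ih =>
    intro i c j h
    rw [pvLocB] at h
    split at h <;> split at h
    all_goals first
      | (injection h with h; omega)
      | (have := ih (i + 1) _ _ h; omega)

theorem pvGoA_eq_loc : ∀ (l : List Char) (i left right : Int) (g : Bool),
    pvGoA l i left right g =
      match pvLocB l i (left - right) with
      | none => none
      | some j => some (j, pvValB (l.take ((j - i).toNat + 1)) (left - right) g) := by
  intro l
  induction l with
  | nil => intro i left right g; simp [pvGoA, pvLocB]
  | cons c rest ih =>
    intro i left right g
    by_cases hc : c = '('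
    · simp only [pvGoA, pvLocB, if_pos hc]
      by_cases hz : left - right + 1 = 0
      · rw [if_pos (by omega : left + 1 = right), if_pos hz]
        simp [pvValB, if_pos hc, show ¬ right > left + 1 by omega,
          show ¬ left - right + 1 < 0 by omega]
      · rw [if_neg (by omega : ¬ left + 1 = right), ih,
          show left + 1 - right = left - right + 1 by omega, if_neg hz]
        cases hj : pvLocB rest (i + 1) (left - right + 1) with
        | none => rfl
        | some j =>
          have hge := pvLocB_ge rest (i + 1) _ j hj
          have htn : (j - i).toNat = (j - (i + 1)).toNat + 1 := by omega
          simp only [htn, List.take_succ_cons, pvValB, if_pos hc,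
            show (right > left + 1) ↔ (left - right + 1 < 0) by omega]
    · simp only [pvGoA, pvLocB, if_neg hc]
      by_cases hz : left - right + -1 = 0
      · rw [if_pos (by omega : left = right + 1), if_pos hz]
        simp [pvValB, if_neg hc, show (right + 1 > left) ↔ (left - right + -1 < 0) by omega]
      · rw [if_neg (by omega : ¬ left = right + 1), ih,
          show left - (right + 1) = left - right + -1 by omega, if_neg hz]
        cases hj : pvLocB rest (i + 1) (left - right + -1) with
        | none => rfl
        | some j =>
          have hge := pvLocB_ge rest (i + 1) _ j hj
          have htn : (j - i).toNat = (j - (i + 1)).toNat + 1 := by omega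
          simp only [htn, List.take_succ_cons, pvValB, if_neg hc,
            show (right + 1 > left) ↔ (left - right + -1 < 0) by omega]

theorem pv_main (p : String) :
    check_balance_index p = check_balance_index_alt p ∨ pvLocB p.toList 0 0 = none := by
  unfold check_balance_index check_balance_index_alt
  rw [pvGoA_eq_loc]
  cases hj : pvLocB p.toList 0 0 with
  | none => right; rfl
  | some j =>
    left
    have hge := pvLocB_ge p.toList 0 0 j hj
    rw [show (0:Int) - 0 = 0 from rfl, hj]
    dsimp only
    rw [PySem.List.slice_to]
    · rw [show (j + 1).toNat = (j - 0).toNat + 1 by omega]; rfl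
    · omega

theorem pvLocB_none : ∀ (l : List Char) (i c : Int), pvLocB l i c = none →
    ∀ k < l.length, c + 2 * ((l.take (k + 1)).count '(' : Int) - (k + 1) ≠ 0 := by
  intro l
  induction l with
  | nil => intro i c _ k hk; simp at hk
  | cons a rest ih =>
    intro i c h k hk
    rw [pvLocB] at h
    have hsplit : c + (if a = '(' then (1:Int) else -1) ≠ 0 ∧
        pvLocB rest (i + 1) (c + (if a = '(' then 1 else -1)) = none := by
      by_cases hz : c + (if a = '(' then (1:Int) else -1) = 0
      · rw [if_pos hz] at h; exact absurd h (by simp)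
      · exact ⟨hz, by rwa [if_neg hz] at h⟩
    obtain ⟨h1, h2⟩ := hsplit
    cases k with
    | zero =>
      by_cases ha : a = '(' <;> simp [ha] at h1 ⊢ <;> omega
    | succ k =>
      have hk' : k < rest.length := by simpa using hk
      have hih := ih (i + 1) _ h2 k hk'
      by_cases ha : a = '(' <;> simp [ha] at h1 hih ⊢ <;> omega

-- ===== VERDICT (by name: the statement is the Claim_ definition above) =====
theorem check_balance_index_spec : Claim_equal_check_balance_index := by
  intro p _ hpre
  unfold Spec_check_balance_index
  rcases pv_main p with h | h
  · exact h
  · exfalso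
    obtain ⟨k, hk, hbal⟩ := hpre
    have := pvLocB_none p.toList 0 0 h k hk
    push_cast at this
    omega
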